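-- pv_equiv track=rewrite | github.com/clduab11/hermes-agent | hermes/voice_pipeline.py | _contains_prohibited_content
-- ===== SOURCE A (Python) =====
-- def _contains_prohibited_content(text: str) -> bool:
--     """
--     Check if text contains prohibited content that requires compliance response.
--
--     Args:
--         text: User input text
--
--     Returns:
--         True if prohibited content detected
--     """
--     prohibited_patterns = [
--         # Explicit legal advice requests
--         "what should i do",
--         "what should i sue for",
--         "should i plead",
--         "am i guilty",
--         "will i go to jail",
--         "what are my chances",
--         # Specific case strategy
--         "how to win",
--         "best strategy",
--         "what to say in court",
--         "how to lie",
--         # Inappropriate requests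
--         "free legal advice",
--         "quick legal advice",
--         "off the record",
--     ]
--
--     text_lower = text.lower()
--     return any(pattern in text_lower for pattern in prohibited_patterns)
-- ===== SOURCE B (Python) =====
-- _PROHIBITED = [
--     "what should i do",
--     "what should i sue for",
--     "should i plead",
--     "am i guilty",
--     "will i go to jail",
--     "what are my chances",
--     "how to win",
--     "best strategy",
--     "what to say in court",
--     "how to lie",
--     "free legal advice",
--     "quick legal advice",
--     "off the record",
-- ]
--
--
-- def _contains_prohibited_content(text: str) -> bool:
--     # Single left-to-right pass: at each position, test whether any
--     # prohibited phrase starts there (text-major instead of pattern-major).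
--     t = text.lower()
--     for i in range(len(t)):
--         for p in _PROHIBITED:
--             if t.startswith(p, i):
--                 return True
--     return False
-- ===== Notes on version B (the rewrite author's own statement) =====
-- stated objective: alternative
-- what changed: B replaces A's pattern-major any(p in text_lower) (13 separate substring scans over the text) with a single text-major pass: one loop over text positions, testing at each position whether any phrase starts there.
import Mathlib
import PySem

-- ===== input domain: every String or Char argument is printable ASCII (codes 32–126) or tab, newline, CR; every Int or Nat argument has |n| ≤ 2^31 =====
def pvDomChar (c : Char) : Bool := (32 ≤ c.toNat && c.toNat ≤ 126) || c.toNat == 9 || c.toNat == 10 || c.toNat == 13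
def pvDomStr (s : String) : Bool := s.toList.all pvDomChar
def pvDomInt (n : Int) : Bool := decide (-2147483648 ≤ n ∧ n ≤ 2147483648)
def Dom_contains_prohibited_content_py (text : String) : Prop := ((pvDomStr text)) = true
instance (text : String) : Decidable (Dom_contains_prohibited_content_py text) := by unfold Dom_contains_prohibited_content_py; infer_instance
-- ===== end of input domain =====

-- B replaces A's pattern-major any(p in text_lower) (13 substring scans) with one
-- text-major pass testing at each position whether any phrase starts there (alternative).

-- shared constant data: the module's prohibited phrase list
def pvPatterns : List String := [
  "what should i do",
  "what should i sue for",
  "should i plead",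
  "am i guilty",
  "will i go to jail",
  "what are my chances",
  "how to win",
  "best strategy",
  "what to say in court",
  "how to lie",
  "free legal advice",
  "quick legal advice",
  "off the record"
]

-- ===== PORT A =====
def contains_prohibited_content_py (text : String) : Bool :=
  let text_lower := PySem.Str.lower text
  pvPatterns.any (fun pattern => PySem.Str.isIn pattern text_lower)

-- ===== PORT B =====
-- B's phrase list, as char lists (B works position-by-position on the char level)
def pvPatternsB : List (List Char) := pvPatterns.map String.toList

-- B's scan: 'for i in range(len(t)): if any(t[i:].startswith(p) ...): return True'
def pvScanB : List Char → Bool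
  | [] => false
  | c :: rest =>
      pvPatternsB.any (fun p => PySem.Chars.startswith (c :: rest) p) || pvScanB rest

def contains_prohibited_content_py_alt (text : String) : Bool :=
  pvScanB (PySem.Str.lower text).toList

-- ===== PRECONDITION & SPEC =====
def Spec_contains_prohibited_content_py (text : String) (out : Bool) : Prop := out = contains_prohibited_content_py_alt text
instance (text : String) (out : Bool) : Decidable (Spec_contains_prohibited_content_py text out) := by unfold Spec_contains_prohibited_content_py; infer_instance

-- ===== CLAIM (what is proved, stated in full; the proofs are below) =====
def Claim_equal_contains_prohibited_content_py : Prop := ∀ (text : String), Dom_contains_prohibited_content_py text → Spec_contains_prohibited_content_py text (contains_prohibited_content_py text)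

-- ===== LEMMAS AND PROOFS =====

-- every prohibited phrase is nonempty
theorem pvPatternsB_ne_nil : ∀ p ∈ pvPatternsB, p ≠ [] := by decide

-- B's scan finds exactly the infix occurrences of some phrase
theorem pvScanB_iff (s : List Char) : pvScanB s = true ↔ ∃ p ∈ pvPatternsB, p <:+: s := by
  induction s with
  | nil =>
      simp only [pvScanB, Bool.false_eq_true, false_iff]
      rintro ⟨p, hp, hinf⟩
      exact pvPatternsB_ne_nil p hp (List.eq_nil_of_infix_nil hinf)
  | cons c rest ih =>
      simp only [pvScanB, Bool.or_eq_true, List.any_eq_true, ih,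
        PySem.Chars.startswith_iff, List.infix_cons_iff]
      constructor
      · rintro (⟨p, hp, h⟩ | ⟨p, hp, h⟩)
        · exact ⟨p, hp, Or.inl h⟩
        · exact ⟨p, hp, Or.inr h⟩
      · rintro ⟨p, hp, h | h⟩
        · exact Or.inl ⟨p, hp, h⟩
        · exact Or.inr ⟨p, hp, h⟩

-- ===== VERDICT (by name: the statement is the Claim_ definition above) =====
theorem contains_prohibited_content_py_spec : Claim_equal_contains_prohibited_content_py := by
  intro text _
  unfold Spec_contains_prohibited_content_py
  unfold contains_prohibited_content_py contains_prohibited_content_py_alt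
  apply Bool.eq_iff_iff.mpr
  rw [pvScanB_iff]
  simp only [List.any_eq_true, PySem.Str.isIn_iff_infix, pvPatternsB, List.mem_map]
  constructor
  · rintro ⟨p, hp, h⟩; exact ⟨p.toList, ⟨p, hp, rfl⟩, h⟩
  · rintro ⟨_, ⟨p, hp, rfl⟩, h⟩; exact ⟨p, hp, h⟩
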